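-- pv_equiv track=rewrite | github.com/deltazefiro/bdapt | bdapt/apt_operations.py | parse_apt_dry_run_output
-- ===== SOURCE A (Python) =====
-- from typing import List, Set, Tuple
--
-- def parse_apt_dry_run_output(output: str) -> Tuple[int, List[str]]:
--     """Parse apt dry-run output to extract packages to be installed.
--
--     Args:
--         output: stdout from apt install --dry-run
--
--     Returns:
--         Tuple of (count of new packages, list of package names)
--     """
--     new_packages = []
--     lines = output.split('\n')
--
--     for line in lines:
--         # Look for lines like "Inst package-name (version info)"
--         if line.strip().startswith('Inst '):
--             parts = line.strip().split()
--             if len(parts) >= 2: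
--                 package_name = parts[1]
--                 new_packages.append(package_name)
--
--     return len(new_packages), new_packages
-- ===== SOURCE B (Python) =====
-- from typing import List, Tuple
--
-- _WS = ' \t\r\x0b\x0c'  # line whitespace (str.split/strip whitespace minus '\n')
--
-- def parse_apt_dry_run_output(output: str) -> Tuple[int, List[str]]:
--     """Parse apt dry-run output to extract packages to be installed.
--
--     Single pass over the raw string with an index cursor: per line, skip
--     leading whitespace, match the literal 'Inst ' header, then grab the
--     first whitespace-delimited token. No per-line strip/split lists.
--     """
--     new_packages = []
--     n = len(output)
--     i = 0
--     while i < n: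
--         k = i
--         while k < n and output[k] in _WS:
--             k += 1
--         if output.startswith('Inst ', k):
--             k += 5
--             while k < n and output[k] in _WS:
--                 k += 1
--             start = k
--             while k < n and output[k] not in _WS and output[k] != '\n':
--                 k += 1
--             if k > start:
--                 new_packages.append(output[start:k])
--         nl = output.find('\n', k)
--         i = n if nl == -1 else nl + 1
--     return len(new_packages), new_packages
-- ===== Notes on version B (the rewrite author's own statement) =====
-- stated objective: alternative
-- what changed: A splits the output into a list of lines and, per line, builds stripped copies and a split() word list; B makes a single index-cursor pass over the raw string, skipping whitespace, matching the literal 'Inst ' header and slicing out the first token directly, with no per-line intermediate lists.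
import Mathlib
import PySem

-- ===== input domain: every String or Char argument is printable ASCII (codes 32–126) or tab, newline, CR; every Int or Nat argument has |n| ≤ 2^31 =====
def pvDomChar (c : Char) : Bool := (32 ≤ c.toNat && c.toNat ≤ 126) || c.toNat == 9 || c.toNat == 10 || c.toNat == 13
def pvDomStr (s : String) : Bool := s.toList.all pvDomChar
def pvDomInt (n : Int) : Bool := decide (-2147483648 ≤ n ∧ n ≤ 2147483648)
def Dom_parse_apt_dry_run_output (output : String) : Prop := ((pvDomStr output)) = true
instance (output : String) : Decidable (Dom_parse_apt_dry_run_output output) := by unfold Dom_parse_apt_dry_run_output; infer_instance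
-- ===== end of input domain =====

-- B replaces A's per-line strip/startswith/split passes by a single index-cursor scan over
-- the raw string (objective: alternative — one pass, no intermediate per-line string lists).

-- ===== PORT A =====
def parse_apt_dry_run_output (output : String) : Int × List String :=
  let lines := PySem.Chars.splitOn output.toList ['\n']
  let new_packages := lines.foldl (fun acc line =>
    let stripped := PySem.Chars.strip line
    if PySem.Chars.startswith stripped "Inst ".toList then
      let parts := PySem.Chars.split₀ stripped
      if 2 ≤ parts.length then acc ++ [String.ofList (parts.getD 1 [])] else acc
    else acc) []
  ((new_packages.length : Int), new_packages)

-- ===== PORT B =====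
-- membership in the _WS string of Source B
def altWS (c : Char) : Bool := c == ' ' || c == '\t' || c == '\r' || c == '\x0b' || c == '\x0c'

-- the inner body of Source B's loop after the leading-whitespace skip: the 'Inst ' match,
-- the token grab and the conditional append; returns the cursor (as the remaining
-- suffix of the input) and the updated accumulator
def altLine (cs1 : List Char) (acc : List String) : List Char × List String :=
  if "Inst ".toList.isPrefixOf cs1 then
    let rest1 := (cs1.drop 5).dropWhile altWS
    let tok := rest1.takeWhile (fun c => !altWS c && c != '\n')
    (rest1.drop tok.length, if tok.isEmpty then acc else acc ++ [String.ofList tok])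
  else (cs1, acc)

theorem altLine_fst_length (cs1 : List Char) (acc : List String) :
    (altLine cs1 acc).1.length ≤ cs1.length := by
  unfold altLine
  split
  · simp only
    have h1 := List.length_dropWhile_le altWS (cs1.drop 5)
    have h2 := List.length_drop (l := (cs1.drop 5).dropWhile altWS)
      (i := (((cs1.drop 5).dropWhile altWS).takeWhile (fun c => !altWS c && c != '\n')).length)
    have h3 := List.length_drop (l := cs1) (i := 5)
    omega
  · simp

-- Source B's while loop: at the start of each iteration `cs` is the suffix output[i:];
-- `output.find('\n', k)` + `i = nl + 1` becomes dropping up to and past the next newline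
def altGo (cs : List Char) (acc : List String) : List String :=
  if cs.isEmpty then acc
  else
    let p := altLine (cs.dropWhile altWS) acc
    match h : p.1.dropWhile (· != '\n') with
    | [] => p.2
    | _ :: u => altGo u p.2
termination_by cs.length
decreasing_by
  have h1 : u.length + 1 ≤ (altLine (cs.dropWhile altWS) acc).1.length := by
    have := List.length_dropWhile_le (· != '\n') (altLine (cs.dropWhile altWS) acc).1
    rw [h] at this; simpa using this
  have h2 := altLine_fst_length (cs.dropWhile altWS) acc
  have h3 := List.length_dropWhile_le altWS cs
  omega

def parse_apt_dry_run_output_alt (output : String) : Int × List String :=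
  let new_packages := altGo output.toList []
  ((new_packages.length : Int), new_packages)

-- ===== PRECONDITION & SPEC =====
def Spec_parse_apt_dry_run_output (output : String) (out : Int × List String) : Prop := out = parse_apt_dry_run_output_alt output
instance (output : String) (out : Int × List String) : Decidable (Spec_parse_apt_dry_run_output output out) := by unfold Spec_parse_apt_dry_run_output; infer_instance

-- ===== CLAIM (what is proved, stated in full; the proofs are below) =====
def Claim_equal_parse_apt_dry_run_output : Prop := ∀ (output : String), Dom_parse_apt_dry_run_output output → Spec_parse_apt_dry_run_output output (parse_apt_dry_run_output output)

-- ===== LEMMAS AND PROOFS =====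

-- ---- generic list lemmas ----

theorem dropWhile_congr' {α : Type} {p q : α → Bool} (l : List α) (h : ∀ x ∈ l, p x = q x) :
    l.dropWhile p = l.dropWhile q := by
  induction l with
  | nil => rfl
  | cons a t ih =>
    simp only [List.dropWhile_cons]
    rw [h a (by simp)]
    split
    · exact ih fun x hx => h x (by simp [hx])
    · rfl

theorem takeWhile_congr' {α : Type} {p q : α → Bool} (l : List α) (h : ∀ x ∈ l, p x = q x) :
    l.takeWhile p = l.takeWhile q := by
  induction l with
  | nil => rfl
  | cons a t ih =>
    simp only [List.takeWhile_cons]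
    rw [h a (by simp)]
    split
    · rw [ih fun x hx => h x (by simp [hx])]
    · rfl

theorem prefixOf_append_stop {p l l₂ : List Char} {y : Char} (hy : y ∉ p) :
    p.isPrefixOf (l ++ y :: l₂) = p.isPrefixOf l := by
  induction p generalizing l with
  | nil => simp [List.isPrefixOf]
  | cons a t ih =>
    cases l with
    | nil =>
      simp only [List.nil_append, List.isPrefixOf]
      have : (a == y) = false := by simp; rintro rfl; exact hy (by simp)
      simp [this]
    | cons b m =>
      simp only [List.cons_append, List.isPrefixOf]
      rw [ih (fun hm => hy (by simp [hm]))]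

theorem takeWhile_append_stop {p : Char → Bool} {xs ys : List Char} {y : Char} (hy : p y = false) :
    List.takeWhile p (xs ++ y :: ys) = List.takeWhile p xs := by
  rw [List.takeWhile_append]
  split
  · next h =>
    have e := (List.takeWhile_sublist (p := p) (l := xs)).eq_of_length h
    rw [e, List.takeWhile_cons, hy]
    simp
  · rfl

theorem dropWhile_append_stop {p : Char → Bool} {xs ys : List Char} {y : Char} (hy : p y = false) :
    List.dropWhile p (xs ++ y :: ys) = List.dropWhile p xs ++ y :: ys := by
  rw [List.dropWhile_append]
  split
  · next h =>
    rw [List.dropWhile_cons, hy]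
    simp [List.isEmpty_iff.mp h]
  · rfl

theorem head_dropWhile_false {p : Char → Bool} {l t : List Char} {c : Char}
    (h : l.dropWhile p = c :: t) : p c = false := by
  have hne : l.dropWhile p ≠ [] := by simp [h]
  have := List.head_dropWhile_not p hne
  simp only [h, List.head_cons] at this
  exact this

-- ---- character-class lemmas (on the grader's domain) ----

theorem char_toNat_inj {a b : Char} : a.toNat = b.toNat ↔ a = b := eq_iff_eq_of_cmp_eq_cmp rfl

theorem ws_eq {c : Char} (hd : pvDomChar c = true) (hn : c ≠ '\n') :
    PySem.Chars.isspace c = altWS c := by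
  rw [Bool.eq_iff_iff]
  have hn' : c.toNat ≠ 10 := fun h => hn (char_toNat_inj.mp h)
  simp only [pvDomChar, Bool.or_eq_true, Bool.and_eq_true, decide_eq_true_eq, beq_iff_eq,
    Nat.le_iff_lt_add_one] at hd
  simp only [PySem.Chars.isspace, altWS, Bool.or_eq_true, Bool.and_eq_true, decide_eq_true_eq,
    beq_iff_eq, ← char_toNat_inj]
  rw [show ' '.toNat = 32 from rfl, show '\t'.toNat = 9 from rfl, show '\x0d'.toNat = 13 from rfl,
    show '\x0b'.toNat = 11 from rfl, show '\x0c'.toNat = 12 from rfl]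
  omega

theorem tok_eq {c : Char} (hd : pvDomChar c = true) :
    (!altWS c && c != '\n') = !PySem.Chars.isspace c := by
  by_cases hn : c = '\n'
  · subst hn; decide
  · rw [ws_eq hd hn]
    simp [hn]

-- ---- reference splitter: `cs.split('\n')` as plain structural recursion ----

def splitNL : List Char → List (List Char)
  | [] => [[]]
  | c :: t =>
    if c = '\n' then [] :: splitNL t
    else
      match splitNL t with
      | [] => [[c]]
      | h :: r => (c :: h) :: r

def consFirst (pre : List Char) : List (List Char) → List (List Char)
  | [] => [pre]
  | h :: r => (pre ++ h) :: r

theorem splitNL_ne_nil (cs : List Char) : splitNL cs ≠ [] := by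
  induction cs with
  | nil => simp [splitNL]
  | cons c t ih =>
    simp only [splitNL]
    split
    · simp
    · split <;> simp

theorem splitNL_noNL {cs : List Char} (h : '\n' ∉ cs) : splitNL cs = [cs] := by
  induction cs with
  | nil => rfl
  | cons c t ih =>
    have hc : ¬ c = '\n' := fun e => h (by simp [e])
    simp only [splitNL, if_neg hc, ih (fun e => h (by simp [e]))]

theorem splitNL_append {F R : List Char} (h : '\n' ∉ F) :
    splitNL (F ++ '\n' :: R) = F :: splitNL R := by
  induction F with
  | nil => simp [splitNL]
  | cons c t ih =>
    have hc : ¬ c = '\n' := fun e => h (by simp [e])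
    simp only [List.cons_append, splitNL, if_neg hc, ih (fun e => h (by simp [e]))]

theorem splitOn_go_inv (fuel : Nat) (l cur : List Char) (acc : List (List Char))
    (hf : l.length < fuel) :
    PySem.Chars.splitOn.go ['\n'] fuel l cur acc
      = acc.reverse ++ consFirst cur.reverse (splitNL l) := by
  induction fuel generalizing l cur acc with
  | zero => omega
  | succ n ih =>
    match l with
    | [] => simp [PySem.Chars.splitOn.go, splitNL, consFirst]
    | c :: rest =>
      by_cases hc : c = '\n'
      · subst hc
        rw [show PySem.Chars.splitOn.go ['\n'] (n+1) ('\n'::rest) cur acc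
            = PySem.Chars.splitOn.go ['\n'] n (List.drop 1 ('\n'::rest)) [] (cur.reverse :: acc) by
          simp [PySem.Chars.splitOn.go, List.isPrefixOf]]
        rw [ih _ _ _ (by simp at hf ⊢; omega)]
        cases hs : splitNL rest with
        | nil => exact absurd hs (splitNL_ne_nil rest)
        | cons h r => simp [splitNL, hs, consFirst]
      · rw [show PySem.Chars.splitOn.go ['\n'] (n+1) (c::rest) cur acc
            = PySem.Chars.splitOn.go ['\n'] n rest (c :: cur) acc by
          have : ('\n' == c) = false := by simp [Ne.symm hc]
          simp [PySem.Chars.splitOn.go, List.isPrefixOf, this]]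
        rw [ih _ _ _ (by simp at hf ⊢; omega)]
        simp [splitNL, hc]
        cases hs : splitNL rest with
        | nil => exact absurd hs (splitNL_ne_nil rest)
        | cons h r => simp [consFirst]

theorem splitOn_eq_splitNL (cs : List Char) :
    PySem.Chars.splitOn cs ['\n'] = splitNL cs := by
  rw [PySem.Chars.splitOn, splitOn_go_inv _ _ _ _ (by omega)]
  cases hs : splitNL cs with
  | nil => exact absurd hs (splitNL_ne_nil cs)
  | cons h r => simp [consFirst]

-- ---- reference word splitter: `s.split()` as recursion producing the words ----

def myWords (cs : List Char) : List (List Char) :=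
  match h : cs.dropWhile PySem.Chars.isspace with
  | [] => []
  | c :: t =>
    (c :: t.takeWhile (fun d => !PySem.Chars.isspace d))
      :: myWords (t.dropWhile (fun d => !PySem.Chars.isspace d))
termination_by cs.length
decreasing_by
  have h1 : (c :: t).length ≤ cs.length := by
    have := List.length_dropWhile_le PySem.Chars.isspace cs
    rw [h] at this; simpa using this
  have h2 := List.length_dropWhile_le (fun d => !PySem.Chars.isspace d) t
  simp at h1; omega

def wordsC (pre l : List Char) : List (List Char) :=
  if pre.isEmpty then myWords l
  else (pre ++ l.takeWhile (fun d => !PySem.Chars.isspace d))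
    :: myWords (l.dropWhile (fun d => !PySem.Chars.isspace d))

theorem myWords_nil : myWords [] = [] := by rw [myWords.eq_def]; simp

theorem myWords_congr {cs₁ cs₂ : List Char}
    (h : cs₁.dropWhile PySem.Chars.isspace = cs₂.dropWhile PySem.Chars.isspace) :
    myWords cs₁ = myWords cs₂ := by
  rw [myWords.eq_def, myWords.eq_def, h]

theorem myWords_cons_ws {c : Char} (hc : PySem.Chars.isspace c = true) (t : List Char) :
    myWords (c :: t) = myWords t :=
  myWords_congr (by simp [hc])

theorem myWords_cons_nws {c : Char} (hc : PySem.Chars.isspace c = false) (t : List Char) :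
    myWords (c :: t) = (c :: t.takeWhile (fun d => !PySem.Chars.isspace d))
      :: myWords (t.dropWhile (fun d => !PySem.Chars.isspace d)) := by
  have h : (c :: t).dropWhile PySem.Chars.isspace = c :: t := by simp [hc]
  rw [myWords.eq_def, h]

theorem split₀_go_inv (l cur : List Char) (acc : List (List Char)) :
    PySem.Chars.split₀.go l cur acc = acc.reverse ++ wordsC cur.reverse l := by
  induction l generalizing cur acc with
  | nil =>
    by_cases hcur : cur = []
    · simp [PySem.Chars.split₀.go, hcur, wordsC, myWords_nil]
    · simp [PySem.Chars.split₀.go, hcur, wordsC, List.isEmpty_iff, myWords_nil]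
  | cons c rest ih =>
    by_cases hc : PySem.Chars.isspace c = true
    · by_cases hcur : cur = []
      · rw [show PySem.Chars.split₀.go (c::rest) cur acc = PySem.Chars.split₀.go rest [] acc by
          simp [PySem.Chars.split₀.go, hc, hcur]]
        rw [ih]
        simp [wordsC, hcur, myWords_cons_ws hc]
      · rw [show PySem.Chars.split₀.go (c::rest) cur acc
            = PySem.Chars.split₀.go rest [] (cur.reverse :: acc) by
          simp [PySem.Chars.split₀.go, hc, List.isEmpty_iff, hcur]]
        rw [ih]
        simp [wordsC, hcur, List.isEmpty_iff, myWords_cons_ws hc, hc]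
    · rw [show PySem.Chars.split₀.go (c::rest) cur acc = PySem.Chars.split₀.go rest (c::cur) acc by
        simp [PySem.Chars.split₀.go, hc]]
      rw [ih]
      rw [Bool.not_eq_true] at hc
      by_cases hcur : cur = []
      · simp [wordsC, hcur, List.isEmpty_iff, myWords_cons_nws hc, hc]
      · simp [wordsC, hcur, List.isEmpty_iff, List.takeWhile_cons, hc, List.dropWhile_cons]

theorem split₀_eq_myWords (cs : List Char) :
    PySem.Chars.split₀ cs = myWords cs := by
  rw [PySem.Chars.split₀, split₀_go_inv]
  simp [wordsC]

theorem myWords_of_all_ws {l : List Char} (h : ∀ c ∈ l, PySem.Chars.isspace c = true) :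
    myWords l = [] := by
  rw [myWords.eq_def]
  split
  · rfl
  · next c t heq => rw [List.dropWhile_eq_nil_iff.mpr h] at heq; cases heq

theorem takeWhile_nws_all_ws {w : List Char} (hw : ∀ c ∈ w, PySem.Chars.isspace c = true) :
    w.takeWhile (fun d => !PySem.Chars.isspace d) = [] := by
  cases w with
  | nil => rfl
  | cons c t => simp [List.takeWhile_cons, hw c (by simp)]

theorem dropWhile_nws_all_ws {w : List Char} (hw : ∀ c ∈ w, PySem.Chars.isspace c = true) :
    w.dropWhile (fun d => !PySem.Chars.isspace d) = w := by
  cases w with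
  | nil => rfl
  | cons c t => simp [List.dropWhile_cons, hw c (by simp)]

theorem myWords_append_ws_aux (n : Nat) : ∀ (x w : List Char), x.length ≤ n →
    (∀ c ∈ w, PySem.Chars.isspace c = true) → myWords (x ++ w) = myWords x := by
  induction n with
  | zero =>
    intro x w hx hw
    have hx0 : x = [] := by cases x with | nil => rfl | cons a b => simp at hx
    subst hx0
    rw [List.nil_append, myWords_of_all_ws hw, myWords_nil]
  | succ n ih =>
    intro x w hx hw
    cases hd : x.dropWhile PySem.Chars.isspace with
    | nil =>
      have hxws := List.dropWhile_eq_nil_iff.mp hd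
      rw [myWords_of_all_ws hxws, myWords_of_all_ws (l := x ++ w) (by
        intro c hc
        rcases List.mem_append.mp hc with h | h
        · exact hxws c h
        · exact hw c h)]
    | cons c t =>
      have hc : PySem.Chars.isspace c = false := head_dropWhile_false hd
      have hlen : t.length + 1 ≤ x.length := by
        have := List.length_dropWhile_le PySem.Chars.isspace x
        rw [hd] at this; simpa using this
      have hxw : (x ++ w).dropWhile PySem.Chars.isspace = c :: (t ++ w) := by
        rw [List.dropWhile_append, hd]
        simp
      have e1 : myWords (x ++ w) = myWords (c :: (t ++ w)) :=
        myWords_congr (by rw [hxw]; simp [List.dropWhile_cons, hc])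
      have e2 : myWords x = myWords (c :: t) :=
        myWords_congr (by rw [hd]; simp [List.dropWhile_cons, hc])
      rw [e1, e2, myWords_cons_nws hc, myWords_cons_nws hc]
      have htake : (t ++ w).takeWhile (fun d => !PySem.Chars.isspace d)
          = t.takeWhile (fun d => !PySem.Chars.isspace d) := by
        rw [List.takeWhile_append]
        split
        · next h =>
          have e := (List.takeWhile_sublist (p := fun d => !PySem.Chars.isspace d) (l := t)).eq_of_length h
          rw [e, takeWhile_nws_all_ws hw, List.append_nil]
        · rfl
      rw [htake]
      cases hdt : t.dropWhile (fun d => !PySem.Chars.isspace d) with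
      | nil =>
        have : (t ++ w).dropWhile (fun d => !PySem.Chars.isspace d) = w := by
          rw [List.dropWhile_append, hdt]
          simp [dropWhile_nws_all_ws hw]
        rw [this]
        simp [hdt, myWords_of_all_ws hw, myWords_nil]
      | cons d ds =>
        have : (t ++ w).dropWhile (fun d => !PySem.Chars.isspace d)
            = t.dropWhile (fun d => !PySem.Chars.isspace d) ++ w := by
          rw [List.dropWhile_append, hdt]
          simp
        rw [this, ih _ w (by
          have := List.length_dropWhile_le (fun d => !PySem.Chars.isspace d) t
          omega) hw, hdt]

theorem rstrip_decomp (x : List Char) :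
    PySem.Chars.rstrip x ++ (x.reverse.takeWhile PySem.Chars.isspace).reverse = x := by
  rw [PySem.Chars.rstrip]
  rw [← List.reverse_append, List.takeWhile_append_dropWhile, List.reverse_reverse]

theorem rstrip_prefix (x : List Char) : PySem.Chars.rstrip x <+: x :=
  ⟨(x.reverse.takeWhile PySem.Chars.isspace).reverse, rstrip_decomp x⟩

theorem rstrip_append_nws {x y : List Char} (h : ∃ c ∈ y, PySem.Chars.isspace c = false) :
    PySem.Chars.rstrip (x ++ y) = x ++ PySem.Chars.rstrip y := by
  rw [PySem.Chars.rstrip, PySem.Chars.rstrip, List.reverse_append, List.dropWhile_append]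
  have hne : y.reverse.dropWhile PySem.Chars.isspace ≠ [] := by
    intro he
    obtain ⟨c, hc, hcw⟩ := h
    have := List.dropWhile_eq_nil_iff.mp he c (by simp [hc])
    rw [hcw] at this; cases this
  rw [if_neg (by simpa using hne)]
  simp

-- ---- per-line outputs of B and of A ----

def lineOut (L : List Char) : List String :=
  let cs1 := L.dropWhile altWS
  if "Inst ".toList.isPrefixOf cs1 then
    let tok := ((cs1.drop 5).dropWhile altWS).takeWhile (fun c => !altWS c && c != '\n')
    if tok.isEmpty then [] else [String.ofList tok]
  else []

def lineOutA (L : List Char) : List String :=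
  let stripped := PySem.Chars.strip L
  if PySem.Chars.startswith stripped "Inst ".toList then
    let parts := PySem.Chars.split₀ stripped
    if 2 ≤ parts.length then [String.ofList (parts.getD 1 [])] else []
  else []

theorem line_eq (L : List Char) (hdom : ∀ c ∈ L, pvDomChar c = true) (hnl : '\n' ∉ L) :
    lineOutA L = lineOut L := by
  have hsub : ∀ c ∈ L.dropWhile altWS, c ∈ L := fun c hc =>
    (List.dropWhile_sublist (p := altWS) (l := L)).subset hc
  have hstrip : PySem.Chars.strip L = PySem.Chars.rstrip (L.dropWhile altWS) := by
    rw [PySem.Chars.strip, PySem.Chars.lstrip,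
      dropWhile_congr' L (fun c hc => ws_eq (hdom c hc) (fun e => hnl (e ▸ hc)))]
  by_cases hpre : "Inst ".toList.isPrefixOf (L.dropWhile altWS)
  case neg =>
    have hA : PySem.Chars.startswith (PySem.Chars.strip L) "Inst ".toList = false := by
      rw [hstrip]
      cases hco : PySem.Chars.startswith (PySem.Chars.rstrip (L.dropWhile altWS)) "Inst ".toList
      · rfl
      · rw [PySem.Chars.startswith] at hco
        exact absurd (List.isPrefixOf_iff_prefix.mpr
          ((List.isPrefixOf_iff_prefix.mp hco).trans (rstrip_prefix _))) hpre
    rw [lineOutA, lineOut]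
    simp only [hA, if_neg hpre]
    simp
  case pos =>
    obtain ⟨r, hr⟩ := List.isPrefixOf_iff_prefix.mp hpre
    have hrdom : ∀ c ∈ r, pvDomChar c = true := fun c hc =>
      hdom c (hsub c (by rw [← hr]; simp [hc]))
    have hrnl : '\n' ∉ r := fun hc => hnl (hsub _ (by rw [← hr]; simp [hc]))
    have hdrop5 : (L.dropWhile altWS).drop 5 = r := by
      rw [← hr]; rfl
    cases hrd : r.dropWhile altWS with
    | nil =>
      -- only whitespace after 'Inst ': A strips the line to "Inst" (guard fails), B finds no token
      have hrws : ∀ c ∈ r, PySem.Chars.isspace c = true := fun c hc => by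
        rw [ws_eq (hrdom c hc) (fun e => hrnl (e ▸ hc))]
        exact List.dropWhile_eq_nil_iff.mp hrd c hc
      have hA : PySem.Chars.rstrip (L.dropWhile altWS) = ['I','n','s','t'] := by
        rw [← hr, PySem.Chars.rstrip, List.reverse_append, List.dropWhile_append]
        rw [if_pos (by
          simp only [List.isEmpty_iff]
          exact List.dropWhile_eq_nil_iff.mpr (fun c hc => hrws c (List.mem_reverse.mp hc)))]
        rfl
      rw [lineOutA, lineOut]
      simp only [hstrip, hA, if_pos hpre, hdrop5, hrd]
      rfl
    | cons d ds =>
      have hdmem : d ∈ r := (List.dropWhile_sublist altWS).subset (by rw [hrd]; simp)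
      have hddom : pvDomChar d = true := hrdom d hdmem
      have hdnl : d ≠ '\n' := fun e => hrnl (e ▸ hdmem)
      have hdws : altWS d = false := head_dropWhile_false hrd
      have hdis : PySem.Chars.isspace d = false := by rw [ws_eq hddom hdnl]; exact hdws
      -- B's token
      have htokB : ((L.dropWhile altWS).drop 5).dropWhile altWS = d :: ds := by rw [hdrop5, hrd]
      -- A's guard is true
      have hAst : PySem.Chars.rstrip (L.dropWhile altWS)
          = "Inst ".toList ++ PySem.Chars.rstrip r := by
        rw [← hr]
        exact rstrip_append_nws ⟨d, hdmem, hdis⟩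
      have hguard : PySem.Chars.startswith (PySem.Chars.rstrip (L.dropWhile altWS))
          "Inst ".toList = true := by
        rw [hAst, PySem.Chars.startswith]
        exact List.isPrefixOf_iff_prefix.mpr ⟨_, rfl⟩
      -- A's parts
      have hparts : PySem.Chars.split₀ (PySem.Chars.rstrip (L.dropWhile altWS))
          = ['I','n','s','t'] :: (d :: ds.takeWhile (fun c => !PySem.Chars.isspace c))
            :: myWords (ds.dropWhile (fun c => !PySem.Chars.isspace c)) := by
        rw [split₀_eq_myWords, hAst]
        have hback : myWords ("Inst ".toList ++ PySem.Chars.rstrip r)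
            = myWords ("Inst ".toList ++ r) := by
          conv_rhs => rw [← rstrip_decomp r]
          rw [← List.append_assoc]
          exact (myWords_append_ws_aux (("Inst ".toList ++ PySem.Chars.rstrip r).length) _ _
            le_rfl (fun c hc => List.mem_takeWhile_imp (List.mem_reverse.mp hc))).symm
        rw [hback]
        rw [show ("Inst ".toList ++ r) = 'I' :: ('n'::'s'::'t'::' '::r) from rfl]
        rw [myWords_cons_nws (by decide)]
        have hws1 : PySem.Chars.isspace 'n' = false := by decide
        have hws2 : PySem.Chars.isspace 's' = false := by decide
        have hws3 : PySem.Chars.isspace 't' = false := by decide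
        have hws4 : PySem.Chars.isspace ' ' = true := by decide
        have ht : ('n'::'s'::'t'::' '::r).takeWhile (fun d => !PySem.Chars.isspace d)
            = ['n','s','t'] := by
          simp [List.takeWhile_cons, hws1, hws2, hws3, hws4]
        have hdp : ('n'::'s'::'t'::' '::r).dropWhile (fun d => !PySem.Chars.isspace d)
            = ' '::r := by
          simp [List.dropWhile_cons, hws1, hws2, hws3, hws4]
        rw [ht, hdp, myWords_cons_ws (by decide)]
        have hrw : myWords r = myWords (d :: ds) := myWords_congr (by
          rw [dropWhile_congr' r (fun c hc => ws_eq (hrdom c hc) (fun e => hrnl (e ▸ hc))), hrd]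
          simp [hdis])
        rw [hrw, myWords_cons_nws hdis]
      -- tokens agree
      have htokeq : ds.takeWhile (fun c => !PySem.Chars.isspace c)
          = ds.takeWhile (fun c => !altWS c && c != '\n') := by
        refine takeWhile_congr' ds (fun c hc => ?_)
        have hcdom : pvDomChar c = true := hrdom c
          ((List.dropWhile_sublist altWS).subset (by rw [hrd]; simp [hc]))
        rw [tok_eq hcdom]
      rw [lineOutA, lineOut]
      simp only [hstrip, hguard, if_pos hpre, htokB, hparts]
      rw [List.takeWhile_cons]
      simp only [hdws, hdnl, htokeq]
      simp [hdnl]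

-- ---- B's loop processes exactly one line per iteration ----

theorem altWS_nl : altWS '\n' = false := by decide

theorem noNL_dropWhile_ne {X : List Char} (h : '\n' ∉ X) :
    X.dropWhile (· != '\n') = [] :=
  List.dropWhile_eq_nil_iff.mpr (fun c hc => by
    simp only [bne_iff_ne, ne_eq, decide_eq_true_eq]
    exact fun e => h (e ▸ hc))

theorem altLine_fst (cs1 : List Char) (acc : List String) :
    (altLine cs1 acc).1 = if "Inst ".toList.isPrefixOf cs1 then
      ((cs1.drop 5).dropWhile altWS).drop
        ((((cs1.drop 5).dropWhile altWS).takeWhile (fun c => !altWS c && c != '\n')).length)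
    else cs1 := by
  unfold altLine
  split <;> simp_all

theorem altLine_snd (cs1 : List Char) (acc : List String) :
    (altLine cs1 acc).2 = acc ++
      (if "Inst ".toList.isPrefixOf cs1 then
        (if (((cs1.drop 5).dropWhile altWS).takeWhile (fun c => !altWS c && c != '\n')).isEmpty
         then []
         else [String.ofList (((cs1.drop 5).dropWhile altWS).takeWhile
                (fun c => !altWS c && c != '\n'))])
       else []) := by
  unfold altLine
  split
  · simp only
    split <;> simp_all
  · simp

theorem altLine_fst_subset (cs1 : List Char) (acc : List String) :
    ∀ c ∈ (altLine cs1 acc).1, c ∈ cs1 := by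
  intro c hc
  rw [altLine_fst] at hc
  split at hc
  · exact ((List.drop_sublist _ _).trans
      ((List.dropWhile_sublist altWS).trans (List.drop_sublist _ _))).subset hc
  · exact hc

theorem altGo_noNL (cs : List Char) (acc : List String) (h : '\n' ∉ cs) :
    altGo cs acc = acc ++ lineOut cs := by
  cases hcs : cs with
  | nil =>
    rw [altGo]
    simp [lineOut, List.isPrefixOf]
  | cons a t =>
    rw [← hcs]
    have hne : cs.isEmpty = false := by rw [hcs]; rfl
    rw [altGo, if_neg (by simp [hne])]
    have hsub : '\n' ∉ (altLine (cs.dropWhile altWS) acc).1 := fun hmem =>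
      h ((List.dropWhile_sublist altWS).subset (altLine_fst_subset _ acc _ hmem))
    have hnil := noNL_dropWhile_ne hsub
    dsimp only
    split
    · rw [altLine_snd, lineOut]
    · next heq => rw [hnil] at heq; cases heq

theorem altGo_cons_line (F R : List Char) (acc : List String) (hF : '\n' ∉ F) :
    altGo (F ++ '\n' :: R) acc = altGo R (acc ++ lineOut F) := by
  have hne : (F ++ '\n' :: R).isEmpty = false := by cases F <;> rfl
  have hF1 : (F ++ '\n' :: R).dropWhile altWS = F.dropWhile altWS ++ '\n' :: R :=
    dropWhile_append_stop altWS_nl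
  have hF1nl : '\n' ∉ F.dropWhile altWS := fun hm => hF ((List.dropWhile_sublist altWS).subset hm)
  have hpre' : "Inst ".toList.isPrefixOf ((F ++ '\n' :: R).dropWhile altWS)
      = "Inst ".toList.isPrefixOf (F.dropWhile altWS) := by
    rw [hF1, prefixOf_append_stop (by decide)]
  -- the scrutinee of the loop's line-skip is always '\n' :: R
  have hscrut : (altLine ((F ++ '\n' :: R).dropWhile altWS) acc).1.dropWhile (· != '\n')
      = '\n' :: R := by
    rw [altLine_fst]
    split
    · next hp =>
      rw [hpre'] at hp
      obtain ⟨r, hr⟩ := List.isPrefixOf_iff_prefix.mp hp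
      have hrnl : '\n' ∉ r := fun hm => hF1nl (by rw [← hr]; simp [hm])
      have hlen5 : 5 ≤ (F.dropWhile altWS).length := by rw [← hr]; simp
      have hdrop : ((F ++ '\n' :: R).dropWhile altWS).drop 5 = r ++ '\n' :: R := by
        rw [hF1, List.drop_append_of_le_length hlen5, ← hr]
        simp
      rw [hdrop, dropWhile_append_stop altWS_nl, takeWhile_append_stop (by decide),
        List.drop_append_of_le_length (List.takeWhile_sublist _).length_le,
        dropWhile_append_stop (by decide), noNL_dropWhile_ne (fun hm =>
          hrnl ((List.dropWhile_sublist altWS).subset ((List.drop_sublist _ _).subset hm)))]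
      rfl
    · rw [hF1, dropWhile_append_stop (by decide), noNL_dropWhile_ne hF1nl]
      rfl
  -- the accumulator after the line equals acc ++ lineOut F
  have hacc : (altLine ((F ++ '\n' :: R).dropWhile altWS) acc).2 = acc ++ lineOut F := by
    rw [altLine_snd, hpre', lineOut]
    by_cases hp : "Inst ".toList.isPrefixOf (F.dropWhile altWS)
    · obtain ⟨r, hr⟩ := List.isPrefixOf_iff_prefix.mp hp
      have hlen5 : 5 ≤ (F.dropWhile altWS).length := by rw [← hr]; simp
      have hdrop : ((F ++ '\n' :: R).dropWhile altWS).drop 5 = r ++ '\n' :: R := by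
        rw [hF1, List.drop_append_of_le_length hlen5, ← hr]
        simp
      have hdropF : (F.dropWhile altWS).drop 5 = r := by rw [← hr]; simp
      rw [hdrop, hdropF, dropWhile_append_stop altWS_nl, takeWhile_append_stop (by decide)]
    · simp only [Bool.not_eq_true] at hp
      rw [hp]
      rfl
  rw [altGo, if_neg (by simp [hne])]
  dsimp only
  split
  · next heq => rw [hscrut] at heq; cases heq
  · next b u heq =>
    rw [hscrut] at heq
    cases heq
    rw [hacc]
theorem nl_decomp {cs : List Char} (h : '\n' ∈ cs) :
    cs = cs.takeWhile (· != '\n') ++ '\n' :: (cs.dropWhile (· != '\n')).tail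
      ∧ '\n' ∉ cs.takeWhile (· != '\n') := by
  have hne : cs.dropWhile (· != '\n') ≠ [] := by
    intro he
    have := List.dropWhile_eq_nil_iff.mp he '\n' h
    simp at this
  constructor
  · cases hd : cs.dropWhile (· != '\n') with
    | nil => exact absurd hd hne
    | cons a t =>
      have ha : (a != '\n') = false := head_dropWhile_false (p := (· != '\n')) hd
      have ha' : a = '\n' := by simpa using ha
      conv_lhs => rw [← List.takeWhile_append_dropWhile (p := (· != '\n')) (l := cs)]
      rw [hd, ha']
      simp
  · intro hm
    have := List.mem_takeWhile_imp hm
    simp at this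

theorem altGo_split_aux (n : Nat) : ∀ (cs : List Char) (acc : List String), cs.length ≤ n →
    altGo cs acc = acc ++ (splitNL cs).flatMap lineOut := by
  induction n with
  | zero =>
    intro cs acc hlen
    have : cs = [] := by cases cs with | nil => rfl | cons a t => simp at hlen
    subst this
    rw [altGo_noNL _ _ (by simp), splitNL_noNL (by simp)]
    simp
  | succ n ih =>
    intro cs acc hlen
    by_cases hin : '\n' ∈ cs
    · obtain ⟨hdec, hFnl⟩ := nl_decomp hin
      have hRlen : (cs.dropWhile (· != '\n')).tail.length + 1 ≤ cs.length := by
        have h1 := List.length_dropWhile_le (· != '\n') cs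
        have h2 : cs.dropWhile (· != '\n') ≠ [] := by
          intro he
          have := List.dropWhile_eq_nil_iff.mp he '\n' hin
          simp at this
        cases hd : cs.dropWhile (· != '\n') with
        | nil => exact absurd hd h2
        | cons a t => rw [hd] at h1; simp [hd]; simp at h1; omega
      conv_lhs => rw [hdec]
      conv_rhs => rw [hdec]
      rw [altGo_cons_line _ _ _ hFnl, splitNL_append hFnl,
        ih _ _ (by omega)]
      simp [List.append_assoc]
    · rw [altGo_noNL _ _ hin, splitNL_noNL hin]
      simp

theorem splitNL_mem (n : Nat) : ∀ (cs : List Char), cs.length ≤ n →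
    ∀ L ∈ splitNL cs, ('\n' ∉ L) ∧ (∀ c ∈ L, c ∈ cs) := by
  induction n with
  | zero =>
    intro cs hlen L hL
    have : cs = [] := by cases cs with | nil => rfl | cons a t => simp at hlen
    subst this
    rw [splitNL_noNL (by simp)] at hL
    simp at hL
    subst hL
    simp
  | succ n ih =>
    intro cs hlen L hL
    by_cases hin : '\n' ∈ cs
    · obtain ⟨hdec, hFnl⟩ := nl_decomp hin
      rw [hdec] at hL
      rw [splitNL_append hFnl] at hL
      rcases List.mem_cons.mp hL with he | hm
      · subst he
        refine ⟨hFnl, fun c hc => ?_⟩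
        exact (List.takeWhile_sublist _).subset hc
      · have hRlen : (cs.dropWhile (· != '\n')).tail.length ≤ n := by
          have h1 := List.length_dropWhile_le (· != '\n') cs
          cases hd2 : cs.dropWhile (· != '\n') with
          | nil => simp
          | cons a t =>
            rw [hd2] at h1
            simp only [hd2, List.tail_cons]
            simp at h1
            omega
        obtain ⟨h1, h2⟩ := ih _ hRlen L hm
        refine ⟨h1, fun c hc => ?_⟩
        have : c ∈ (cs.dropWhile (· != '\n')).tail := h2 c hc
        exact (List.IsSuffix.subset (List.tail_suffix _)).trans
          (List.IsSuffix.subset (List.dropWhile_suffix _)) this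
    · rw [splitNL_noNL hin] at hL
      simp at hL
      subst hL
      exact ⟨hin, fun c hc => hc⟩

theorem flatMap_congr_mem {α β : Type} {f g : α → List β} (l : List α)
    (h : ∀ x ∈ l, f x = g x) : l.flatMap f = l.flatMap g := by
  induction l with
  | nil => rfl
  | cons a t ih =>
    simp only [List.flatMap_cons]
    rw [h a (by simp), ih (fun x hx => h x (by simp [hx]))]

theorem foldA (lines : List (List Char)) (acc : List String) :
    lines.foldl (fun acc line =>
      let stripped := PySem.Chars.strip line
      if PySem.Chars.startswith stripped "Inst ".toList then
        let parts := PySem.Chars.split₀ stripped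
        if 2 ≤ parts.length then acc ++ [String.ofList (parts.getD 1 [])] else acc
      else acc) acc = acc ++ lines.flatMap lineOutA := by
  have hb : (fun (acc : List String) (line : List Char) =>
      let stripped := PySem.Chars.strip line
      if PySem.Chars.startswith stripped "Inst ".toList then
        let parts := PySem.Chars.split₀ stripped
        if 2 ≤ parts.length then acc ++ [String.ofList (parts.getD 1 [])] else acc
      else acc) = (fun acc line => acc ++ lineOutA line) := by
    funext a l
    simp only [lineOutA]
    split
    · split <;> simp
    · simp
  rw [hb, PySem.List.foldl_append_eq_flatMap]

-- ===== VERDICT (by name: the statement is the Claim_ definition above) =====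
theorem parse_apt_dry_run_output_spec : Claim_equal_parse_apt_dry_run_output := by
  intro output hdom
  unfold Spec_parse_apt_dry_run_output parse_apt_dry_run_output parse_apt_dry_run_output_alt
  have hd : ∀ c ∈ output.toList, pvDomChar c = true := by
    have h := hdom
    unfold Dom_parse_apt_dry_run_output pvDomStr at h
    simpa [List.all_eq_true] using h
  have key : (PySem.Chars.splitOn output.toList ['\n']).foldl (fun acc line =>
      let stripped := PySem.Chars.strip line
      if PySem.Chars.startswith stripped "Inst ".toList then
        let parts := PySem.Chars.split₀ stripped
        if 2 ≤ parts.length then acc ++ [String.ofList (parts.getD 1 [])] else acc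
      else acc) [] = altGo output.toList [] := by
    rw [splitOn_eq_splitNL, foldA, altGo_split_aux (output.toList.length) _ _ le_rfl]
    simp only [List.nil_append]
    exact flatMap_congr_mem _ (fun L hL => line_eq L
      (fun c hc => hd c ((splitNL_mem (output.toList.length) _ le_rfl L hL).2 c hc))
      ((splitNL_mem (output.toList.length) _ le_rfl L hL).1))
  exact congrArg (fun l : List String => ((l.length : Int), l)) key
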